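-- pv_equiv track=rewrite | github.com/linhdvu14/cp-sols | sols/CodeChef/FEB221A/DIGMULK.py | solve
-- ===== SOURCE A (Python) =====
-- MOD = 10**9 + 7
--
-- def mat_mul(a, b):
--     '''2D matrix multiplication'''
--     nr_a, nc_a, nr_b, nc_b = len(a), len(a[0]), len(b), len(b[0])
--     assert nc_a == nr_b
--     res = [[0]*nc_b for _ in range(nr_a)]
--     for r in range(nr_a):
--         for c in range(nc_b):
--             for i in range(nc_a):
--                 res[r][c] += a[r][i] * b[i][c]
--                 res[r][c] %= MOD
--     return res
--
-- def mat_pow(mat, e):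
--     '''matrix power: mat^e'''
--     N = len(mat)
--     if e == 1:
--         res = [[0]*N for _ in range(N)]
--         for i in range(N):
--             for j in range(N):
--                 res[i][j] = mat[i][j] % MOD
--         return res
--
--     half = mat_pow(mat, e//2)
--     res = mat_mul(half, half)
--     if e % 2 != 0: res = mat_mul(res, mat)
--     return res
--
-- def solve(N, K, M, S):
--     if M == 0 or K == 0: return N
--
--     cnt = [0]*10
--     for c in S: cnt[int(c)] += 1
--
--     # trans[i][j] = count of digit j after multiplying digit i with K
--     trans = [[0]*10 for _ in range(10)]
--     for i in range(10):
--         sj = str(i * K)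
--         for c in sj: trans[i][int(c)] += 1
--
--     trans = mat_pow(trans, M)
--     res = 0
--     for c, row in zip(cnt, trans):
--         res += c * sum(row)
--         res %= MOD
--
--     return res
-- ===== SOURCE B (Python) =====
-- MOD = 10**9 + 7
--
-- def solve(N, K, M, S):
--     if M == 0 or K == 0: return N
--
--     cnt = [0]*10
--     for c in S: cnt[int(c)] += 1
--
--     # trans[i][j] = count of digit j after multiplying digit i with K
--     trans = [[0]*10 for _ in range(10)]
--     for i in range(10):
--         sj = str(i * K)
--         for c in sj: trans[i][int(c)] += 1
--
--     # iterative binary exponentiation on the ROW VECTOR: v = cnt * trans^M,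
--     # so the answer is simply sum(v) -- no full matrix power is materialized
--     # on the multiply steps, and no final weighted row-sum pass is needed.
--     v = cnt
--     base = trans
--     e = M
--     while e > 0:
--         if e & 1:
--             v = [sum(v[i] * base[i][j] for i in range(10)) % MOD for j in range(10)]
--         base = [[sum(base[i][l] * base[l][j] for l in range(10)) % MOD
--                  for j in range(10)] for i in range(10)]
--         e >>= 1
--     return sum(v) % MOD
-- ===== Notes on version B (the rewrite author's own statement) =====
-- stated objective: alternative
-- what changed: Replaces the recursive matrix power followed by a weighted row-sum pass with an iterative square-and-multiply loop that folds the digit-count row vector directly into the matrix powers, so multiply steps are vector-matrix products and the answer is a plain sum of the final vector.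
import Mathlib
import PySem

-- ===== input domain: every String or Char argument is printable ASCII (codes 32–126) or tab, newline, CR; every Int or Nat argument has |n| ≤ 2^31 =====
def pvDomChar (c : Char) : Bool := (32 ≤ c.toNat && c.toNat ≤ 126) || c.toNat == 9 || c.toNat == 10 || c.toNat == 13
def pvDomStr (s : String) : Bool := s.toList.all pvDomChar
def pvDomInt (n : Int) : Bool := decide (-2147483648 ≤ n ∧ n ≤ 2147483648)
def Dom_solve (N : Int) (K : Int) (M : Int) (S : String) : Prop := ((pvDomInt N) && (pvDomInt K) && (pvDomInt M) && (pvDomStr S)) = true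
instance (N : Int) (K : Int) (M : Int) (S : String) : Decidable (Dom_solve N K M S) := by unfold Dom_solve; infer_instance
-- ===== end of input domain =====

-- B replaces the recursive matrix power + weighted row-sum with an iterative
-- square-and-multiply loop acting on the digit-count row vector (alternative
-- decomposition, same asymptotic cost).


-- ===== PORT A =====

-- matrix/vector element access; exact for the accesses solve performs (all
-- matrices it builds are rectangular 10×10, every index is in range).
def pvIdx (m : List (List Int)) (i j : Nat) : Int := (m.getD i []).getD j 0

-- `cnt[int(c)] += 1` loop of solve; identical code appears verbatim in A and in B,
-- so the helper is shared by both ports.  int(c) raises for a non-digit char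
-- (excluded by Pre_solve); the `none` branch is unreachable there.
def buildCnt (S : String) : List Int :=
  S.toList.foldl (fun cnt c =>
    match PySem.Int.ofStr? (String.mk [c]) with
    | some d => cnt.set d.toNat (cnt.getD d.toNat 0 + 1)
    | none => cnt) (List.replicate 10 0)

-- the `trans` construction of solve (shared verbatim by A and B); for K ≥ 1 the
-- characters of str(i*K) are all digits, the `none` branch is unreachable.
def buildTrans (K : Int) : List (List Int) :=
  (List.range 10).map (fun (i : Nat) =>
    (PySem.Int.toStr ((i : Int) * K)).toList.foldl (fun row c =>
      match PySem.Int.ofStr? (String.mk [c]) with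
      | some d => row.set d.toNat (row.getD d.toNat 0 + 1)
      | none => row) (List.replicate 10 0))

-- mat_mul: the res cells are written independently, so the r/c loops build each
-- entry with Python's i-fold (add, then % MOD) exactly; the assert is a no-op
-- on the matrices solve passes (nc_a = nr_b = 10).
def matMulA (a b : List (List Int)) : List (List Int) :=
  (List.range a.length).map (fun r =>
    (List.range (b.getD 0 []).length).map (fun c =>
      (List.range (a.getD 0 []).length).foldl
        (fun acc i => PySem.Int.mod (acc + pvIdx a r i * pvIdx b i c) 1000000007) 0))

-- mat_pow: recursion on e with e // 2 (Nat division = Python // for e ≥ 0).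
-- Python's base case is e == 1; e = 0 is never reached (solve calls with
-- e = M ≥ 1 under Pre_solve and halving stops at 1), so `e ≤ 1` is exact.
def matPowA (mat : List (List Int)) (e : Nat) : List (List Int) :=
  if e ≤ 1 then
    (List.range mat.length).map (fun i =>
      (List.range mat.length).map (fun j => PySem.Int.mod (pvIdx mat i j) 1000000007))
  else
    let half := matPowA mat (e / 2)
    let res := matMulA half half
    if e % 2 ≠ 0 then matMulA res mat else res
termination_by e
decreasing_by omega

def solve (N : Int) (K : Int) (M : Int) (S : String) : Int :=
  if M = 0 ∨ K = 0 then N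
  else
    let cnt := buildCnt S
    let trans := buildTrans K
    -- M ≥ 1 under Pre_solve, so recursing on M.toNat is Python's recursion on M
    let p := matPowA trans M.toNat
    -- res += c * sum(row); res %= MOD   over zip(cnt, trans)
    (cnt.zip p).foldl (fun res cr => PySem.Int.mod (res + cr.1 * cr.2.sum) 1000000007) 0

-- ===== PORT B =====

-- v = [sum(v[i]*base[i][j] for i in range(10)) % MOD for j in range(10)]
def vecMulB (v : List Int) (base : List (List Int)) : List Int :=
  (List.range 10).map (fun j =>
    PySem.Int.mod ((List.range 10).map (fun i => v.getD i 0 * pvIdx base i j)).sum 1000000007)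

-- base = [[sum(base[i][l]*base[l][j] for l in range(10)) % MOD for j ..] for i ..]
def matSqB (base : List (List Int)) : List (List Int) :=
  (List.range 10).map (fun i =>
    (List.range 10).map (fun j =>
      PySem.Int.mod ((List.range 10).map (fun l => pvIdx base i l * pvIdx base l j)).sum 1000000007))

-- the `while e > 0` square-and-multiply loop (e = M ≥ 1 under Pre_solve, so the
-- Nat countdown e → e / 2 is Python's e >>= 1)
def binLoop (v : List Int) (base : List (List Int)) (e : Nat) : List Int :=
  if e = 0 then v
  else binLoop (if e % 2 = 1 then vecMulB v base else v) (matSqB base) (e / 2)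
termination_by e
decreasing_by omega

def solve_alt (N : Int) (K : Int) (M : Int) (S : String) : Int :=
  if M = 0 ∨ K = 0 then N
  else PySem.Int.mod (binLoop (buildCnt S) (buildTrans K) M.toNat).sum 1000000007

-- ===== PRECONDITION & SPEC =====
-- Pre_solve is exactly where Python A returns: otherwise A raises — ValueError
-- from int(c) on a non-digit char of S (reached when M ≠ 0 and K ≠ 0),
-- ValueError from int('-') when K < 0, RecursionError in mat_pow when M < 0.
def Pre_solve (N : Int) (K : Int) (M : Int) (S : String) : Prop :=
  (M = 0 ∨ K = 0) ∨ (1 ≤ M ∧ 1 ≤ K ∧ S.toList.all (fun c => c.isDigit) = true)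
instance (N : Int) (K : Int) (M : Int) (S : String) : Decidable (Pre_solve N K M S) := by
  unfold Pre_solve; infer_instance

def pvWitness_solve : Int × Int × Int × String := (5, 3, 4, "129")

def Spec_solve (N : Int) (K : Int) (M : Int) (S : String) (out : Int) : Prop := out = solve_alt N K M S
instance (N : Int) (K : Int) (M : Int) (S : String) (out : Int) : Decidable (Spec_solve N K M S out) := by unfold Spec_solve; infer_instance

-- ===== CLAIM (what is proved, stated in full; the proofs are below) =====
def Claim_equal_solve : Prop := ∀ (N : Int) (K : Int) (M : Int) (S : String), Dom_solve N K M S → Pre_solve N K M S → Spec_solve N K M S (solve N K M S)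

-- ===== LEMMAS AND PROOFS =====

def pvToZ (m : List (List Int)) : Matrix (Fin 10) (Fin 10) (ZMod 1000000007) :=
  Matrix.of fun i j => ((pvIdx m i j : Int) : ZMod 1000000007)

def pvToV (v : List Int) : Fin 10 → ZMod 1000000007 :=
  fun i => ((v.getD i 0 : Int) : ZMod 1000000007)

def pvWf (m : List (List Int)) : Prop :=
  m.length = 10 ∧ ∀ i < 10, (m.getD i []).length = 10

theorem pvToZ_apply (m : List (List Int)) (i j : Fin 10) :
    pvToZ m i j = (((m.getD (i : Nat) []).getD (j : Nat) 0 : Int) : ZMod 1000000007) := rfl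

theorem pvToV_apply (v : List Int) (i : Fin 10) :
    pvToV v i = ((v.getD (i : Nat) 0 : Int) : ZMod 1000000007) := rfl

theorem pvCastMod (x : Int) :
    ((PySem.Int.mod x 1000000007 : Int) : ZMod 1000000007) = (x : ZMod 1000000007) := by
  rw [PySem.Int.mod_eq_emod_of_pos (by norm_num)]
  have := ZMod.intCast_mod x 1000000007
  push_cast at this ⊢
  exact this

theorem pvSumMapRange (f : Nat → ZMod 1000000007) (n : Nat) :
    ((List.range n).map f).sum = ∑ i ∈ Finset.range n, f i := by
  induction n with
  | zero => simp
  | succ k ih =>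
      rw [List.range_succ, Finset.sum_range_succ, List.map_append, List.sum_append, ih]; simp

theorem pvIdxMapRange {α : Type} (f : Nat → α) (n i : Nat) (h : i < n) (d : α) :
    ((List.range n).map f).getD i d = f i := by
  rw [List.getD_eq_getElem _ _ (by simpa using h)]
  simp

theorem pvCastFold (g : Nat → Int) (l : List Nat) (init : Int) :
    ((l.foldl (fun acc i => PySem.Int.mod (acc + g i) 1000000007) init : Int) : ZMod 1000000007)
      = (init : ZMod 1000000007) + (l.map (fun i => ((g i : Int) : ZMod 1000000007))).sum := by
  induction l generalizing init with
  | nil => simp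
  | cons a t ih => rw [List.foldl_cons, ih, pvCastMod]; push_cast; rw [List.map_cons, List.sum_cons]; ring

theorem pvCastListSum (l : List Int) :
    ((l.sum : Int) : ZMod 1000000007) = (l.map (fun x : Int => (x : ZMod 1000000007))).sum := by
  induction l with
  | nil => simp
  | cons a t ih => rw [List.sum_cons, List.map_cons, List.sum_cons, ← ih]; push_cast; ring

theorem pvFoldSetLen (cs : List Char) (row : List Int) :
    (cs.foldl (fun row c =>
      match PySem.Int.ofStr? (String.mk [c]) with
      | some d => row.set d.toNat (row.getD d.toNat 0 + 1)
      | none => row) row).length = row.length := by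
  induction cs generalizing row with
  | nil => rfl
  | cons c t ih =>
      rw [List.foldl_cons, ih]
      cases PySem.Int.ofStr? (String.mk [c]) <;> simp

theorem pvBuildCntLen (S : String) : (buildCnt S).length = 10 := by
  unfold buildCnt; rw [pvFoldSetLen]; simp

theorem pvBuildTransWf (K : Int) : pvWf (buildTrans K) := by
  constructor
  · simp [buildTrans]
  · intro i hi
    unfold buildTrans
    rw [pvIdxMapRange _ _ _ hi]
    rw [pvFoldSetLen]; simp

theorem pvMatMulA_wf (a b : List (List Int)) (ha : pvWf a) (hb : pvWf b) :
    pvWf (matMulA a b) := by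
  constructor
  · simp [matMulA, ha.1]
  · intro i hi
    unfold matMulA
    rw [pvIdxMapRange _ _ _ (by rw [ha.1]; exact hi)]
    rw [List.length_map, List.length_range]
    exact hb.2 0 (by norm_num)

theorem pvMatMulA_toZ (a b : List (List Int)) (ha : pvWf a) (hb : pvWf b) :
    pvToZ (matMulA a b) = pvToZ a * pvToZ b := by
  ext i j
  rw [Matrix.mul_apply]
  simp only [pvToZ_apply]
  unfold matMulA pvIdx
  rw [pvIdxMapRange _ _ _ (show (i : Nat) < a.length by rw [ha.1]; exact i.isLt)]
  rw [pvIdxMapRange _ _ _ (show (j : Nat) < (b.getD 0 []).length by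
        rw [hb.2 0 (by norm_num)]; exact j.isLt)]
  rw [ha.2 0 (by norm_num)]
  rw [pvCastFold, pvSumMapRange]
  have hs := Fin.sum_univ_eq_sum_range (fun k =>
       (((a.getD (i : Nat) []).getD k 0 : Int) : ZMod 1000000007)
         * (((b.getD k []).getD (j : Nat) 0 : Int) : ZMod 1000000007)) 10
  rw [hs]
  push_cast
  simp

theorem pvMatPowA_spec (m : List (List Int)) (hm : pvWf m) :
    ∀ e, 1 ≤ e → pvWf (matPowA m e) ∧ pvToZ (matPowA m e) = (pvToZ m) ^ e := by
  intro e
  induction e using Nat.strong_induction_on with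
  | _ e ih =>
    intro he
    rw [matPowA]
    by_cases h1 : e ≤ 1
    · have he1 : e = 1 := by omega
      rw [if_pos h1]
      refine ⟨⟨by simp [hm.1], ?_⟩, ?_⟩
      · intro i hi
        rw [pvIdxMapRange _ _ _ (by rw [hm.1]; exact hi)]
        simp [hm.1]
      · rw [he1, pow_one]
        ext i j
        simp only [pvToZ_apply]
        rw [pvIdxMapRange _ _ _ (show (i : Nat) < m.length by rw [hm.1]; exact i.isLt)]
        rw [pvIdxMapRange _ _ _ (show (j : Nat) < m.length by rw [hm.1]; exact j.isLt)]
        exact pvCastMod _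
    · rw [if_neg h1]
      have h2 := ih (e / 2) (by omega) (by omega)
      have hw := pvMatMulA_wf _ _ h2.1 h2.1
      have hz : pvToZ (matMulA (matPowA m (e / 2)) (matPowA m (e / 2)))
          = (pvToZ m) ^ (e / 2) * (pvToZ m) ^ (e / 2) := by
        rw [pvMatMulA_toZ _ _ h2.1 h2.1, h2.2]
      by_cases ho : e % 2 ≠ 0
      · simp only [if_pos ho]
        refine ⟨pvMatMulA_wf _ _ hw hm, ?_⟩
        rw [pvMatMulA_toZ _ _ hw hm, hz, ← pow_add, ← pow_succ]
        congr 1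
        omega
      · simp only [if_neg ho]
        refine ⟨hw, ?_⟩
        rw [hz, ← pow_add]
        congr 1
        omega

theorem pvVecMulB_len (v : List Int) (b : List (List Int)) : (vecMulB v b).length = 10 := by
  simp [vecMulB]

theorem pvVecMulB_toV (v : List Int) (b : List (List Int)) :
    pvToV (vecMulB v b) = Matrix.vecMul (pvToV v) (pvToZ b) := by
  funext j
  show ((vecMulB v b).getD (j : Nat) 0 : ZMod 1000000007) = _
  unfold vecMulB
  rw [pvIdxMapRange _ _ _ j.isLt]
  rw [pvCastMod, pvCastListSum, List.map_map, pvSumMapRange]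
  simp only [Matrix.vecMul, dotProduct, pvToV_apply, pvToZ_apply]
  have hs := Fin.sum_univ_eq_sum_range (fun i =>
       ((v.getD i 0 : Int) : ZMod 1000000007)
         * (((b.getD i []).getD (j : Nat) 0 : Int) : ZMod 1000000007)) 10
  rw [hs]
  simp [Function.comp, pvIdx]

theorem pvMatSqB_toZ (b : List (List Int)) : pvToZ (matSqB b) = pvToZ b * pvToZ b := by
  ext i j
  rw [Matrix.mul_apply]
  simp only [pvToZ_apply]
  unfold matSqB pvIdx
  rw [pvIdxMapRange _ _ _ i.isLt]
  rw [pvIdxMapRange _ _ _ j.isLt]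
  rw [pvCastMod, pvCastListSum, List.map_map, pvSumMapRange]
  have hs := Fin.sum_univ_eq_sum_range (fun l =>
       (((b.getD (i : Nat) []).getD l 0 : Int) : ZMod 1000000007)
         * (((b.getD l []).getD (j : Nat) 0 : Int) : ZMod 1000000007)) 10
  rw [hs]
  simp [Function.comp]

theorem pvBinLoop_toV : ∀ (e : Nat) (v : List Int) (b : List (List Int)),
    pvToV (binLoop v b e) = Matrix.vecMul (pvToV v) ((pvToZ b) ^ e) := by
  intro e
  induction e using Nat.strong_induction_on with
  | _ e ih =>
    intro v b
    rw [binLoop]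
    by_cases h0 : e = 0
    · rw [if_pos h0, h0, pow_zero, Matrix.vecMul_one]
    · rw [if_neg h0, ih (e / 2) (by omega), pvMatSqB_toZ]
      by_cases h1 : e % 2 = 1
      · rw [if_pos h1, pvVecMulB_toV, Matrix.vecMul_vecMul]
        congr 1
        rw [← pow_two, ← pow_mul, ← pow_succ']
        congr 1
        omega
      · rw [if_neg h1]
        congr 1
        rw [← pow_two, ← pow_mul]
        congr 1
        omega

theorem pvBinLoop_len : ∀ (e : Nat) (v : List Int) (b : List (List Int)),
    v.length = 10 → (binLoop v b e).length = 10 := by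
  intro e
  induction e using Nat.strong_induction_on with
  | _ e ih =>
    intro v b hv
    rw [binLoop]
    by_cases h0 : e = 0
    · rwa [if_pos h0]
    · rw [if_neg h0]
      apply ih (e / 2) (by omega)
      by_cases h1 : e % 2 = 1
      · rw [if_pos h1]; exact pvVecMulB_len v b
      · rwa [if_neg h1]

theorem pvZipMapSum {α β : Type} (f : α → β → ZMod 1000000007) (d₁ : α) (d₂ : β) :
    ∀ (c : List α) (p : List β), c.length = p.length →
    ((c.zip p).map (fun x => f x.1 x.2)).sum
      = ((List.range c.length).map (fun i => f (c.getD i d₁) (p.getD i d₂))).sum := by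
  intro c
  induction c with
  | nil => intro p h; simp
  | cons a t ih =>
      intro p h
      cases p with
      | nil => simp at h
      | cons q ps =>
          simp only [List.zip_cons_cons, List.map_cons, List.sum_cons, List.length_cons]
          rw [ih ps (by simpa using h)]
          rw [List.range_succ_eq_map, List.map_cons, List.sum_cons, List.map_map]
          congr 1

theorem pvCastZipFold (l : List (Int × List Int)) (init : Int) :
    ((l.foldl (fun res cr => PySem.Int.mod (res + cr.1 * cr.2.sum) 1000000007) init : Int) : ZMod 1000000007)
      = (init : ZMod 1000000007)
        + (l.map (fun cr => ((cr.1 : Int) : ZMod 1000000007) * ((cr.2.sum : Int) : ZMod 1000000007))).sum := by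
  induction l generalizing init with
  | nil => simp
  | cons a t ih =>
      rw [List.foldl_cons, ih, pvCastMod, List.map_cons, List.sum_cons]
      push_cast
      ring

theorem pvSumIdx (l : List Int) :
    ((l.sum : Int) : ZMod 1000000007)
      = ((List.range l.length).map (fun j => ((l.getD j 0 : Int) : ZMod 1000000007))).sum := by
  induction l with
  | nil => simp
  | cons a t ih =>
      rw [List.sum_cons, Int.cast_add, ih, List.length_cons, List.range_succ_eq_map,
          List.map_cons, List.sum_cons, List.map_map]
      congr 1

theorem pvRowSum (row : List Int) (h : row.length = 10) :
    ((row.sum : Int) : ZMod 1000000007)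
      = ∑ j : Fin 10, ((row.getD (j : Nat) 0 : Int) : ZMod 1000000007) := by
  rw [pvSumIdx, h, pvSumMapRange, ← Fin.sum_univ_eq_sum_range]

theorem pvFoldModBound {α : Type} (g : Int → α → Int) (l : List α) (init : Int)
    (h : 0 ≤ init ∧ init < 1000000007) :
    0 ≤ l.foldl (fun res x => PySem.Int.mod (g res x) 1000000007) init
      ∧ l.foldl (fun res x => PySem.Int.mod (g res x) 1000000007) init < 1000000007 := by
  induction l generalizing init with
  | nil => exact h
  | cons a t ih =>
      exact ih _ ⟨PySem.Int.mod_nonneg _ (by norm_num), PySem.Int.mod_lt _ (by norm_num)⟩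

theorem pvIntEqOfCast (a b : Int) (ha : 0 ≤ a ∧ a < 1000000007) (hb : 0 ≤ b ∧ b < 1000000007)
    (h : (a : ZMod 1000000007) = (b : ZMod 1000000007)) : a = b := by
  have hmod : a % (1000000007:Int) = b % (1000000007:Int) := by
    have := (ZMod.intCast_eq_intCast_iff' a b 1000000007).mp h
    simpa using this
  rwa [Int.emod_eq_of_lt ha.1 (by exact_mod_cast ha.2),
       Int.emod_eq_of_lt hb.1 (by exact_mod_cast hb.2)] at hmod

-- ===== VERDICT (by name: the statement is the Claim_ definition above) =====
theorem solve_spec : Claim_equal_solve := by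
  intro N K M S hdom hpre
  unfold Spec_solve solve solve_alt
  by_cases h : M = 0 ∨ K = 0
  · simp [h]
  · rw [if_neg h, if_neg h]
    have hM : 1 ≤ M := by
      rcases hpre with h0 | ⟨h1, _, _⟩
      · exact absurd h0 h
      · exact h1
    have he : 1 ≤ M.toNat := by omega
    have hwt := pvBuildTransWf K
    have hcl := pvBuildCntLen S
    have hp := pvMatPowA_spec (buildTrans K) hwt M.toNat he
    have hw := pvBinLoop_len M.toNat (buildCnt S) (buildTrans K) hcl
    apply pvIntEqOfCast
    · exact pvFoldModBound (fun res cr => res + cr.1 * cr.2.sum)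
        ((buildCnt S).zip (matPowA (buildTrans K) M.toNat)) 0 ⟨le_refl 0, by norm_num⟩
    · exact ⟨PySem.Int.mod_nonneg _ (by norm_num), PySem.Int.mod_lt _ (by norm_num)⟩
    · rw [pvCastZipFold]
      rw [pvZipMapSum (fun (x : Int) (row : List Int) =>
            ((x : Int) : ZMod 1000000007) * ((row.sum : Int) : ZMod 1000000007)) 0 []
            (buildCnt S) (matPowA (buildTrans K) M.toNat) (by rw [hcl, hp.1.1])]
      rw [hcl, pvSumMapRange,
          ← Fin.sum_univ_eq_sum_range (fun i =>
              (((buildCnt S).getD i 0 : Int) : ZMod 1000000007)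
                * ((((matPowA (buildTrans K) M.toNat).getD i []).sum : Int) : ZMod 1000000007)) 10]
      rw [pvCastMod, pvRowSum _ hw]
      have hB : ∀ j : Fin 10,
          (((binLoop (buildCnt S) (buildTrans K) M.toNat).getD (j : Nat) 0 : Int) : ZMod 1000000007)
            = Matrix.vecMul (pvToV (buildCnt S)) ((pvToZ (buildTrans K)) ^ M.toNat) j := by
        intro j
        rw [← pvToV_apply, pvBinLoop_toV]
      have hrow : ∀ i : Fin 10,
          ((((matPowA (buildTrans K) M.toNat).getD (i : Nat) []).sum : Int) : ZMod 1000000007)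
            = ∑ j : Fin 10, ((pvToZ (buildTrans K)) ^ M.toNat) i j := by
        intro i
        rw [pvRowSum _ (hp.1.2 _ i.isLt), ← hp.2]
        rfl
      simp only [hB, hrow]
      simp only [Matrix.vecMul, dotProduct]
      rw [Int.cast_zero, zero_add]
      calc ∑ i : Fin 10, (((buildCnt S).getD (i : Nat) 0 : Int) : ZMod 1000000007)
              * ∑ j : Fin 10, ((pvToZ (buildTrans K)) ^ M.toNat) i j
          = ∑ i : Fin 10, ∑ j : Fin 10,
              (((buildCnt S).getD (i : Nat) 0 : Int) : ZMod 1000000007)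
                * ((pvToZ (buildTrans K)) ^ M.toNat) i j := by
            simp [Finset.mul_sum]
        _ = ∑ j : Fin 10, ∑ i : Fin 10,
              (((buildCnt S).getD (i : Nat) 0 : Int) : ZMod 1000000007)
                * ((pvToZ (buildTrans K)) ^ M.toNat) i j := Finset.sum_comm
        _ = ∑ j : Fin 10, ∑ i : Fin 10,
              pvToV (buildCnt S) i * ((pvToZ (buildTrans K)) ^ M.toNat) i j := rfl
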